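/- GENERATED by mk_final_copies.py from the proof of the farm's unit `vorbis_decode_packet_rest.3b` (farm:vorbis_decode_packet_rest.3b.1: Proof.lean) as the
   re-elaboration sweep compiled it — do not edit. -/
import Vorbis.Spec.Units.vorbis_decode_packet_rest_3b
import Vorbis.Spec.Worked.vorbis_decode_packet_rest_3b_Lemmas

open X86 X86.User Asan Vorbis Vorbis.Spec Vorbis.Spec.vorbis_decode_packet_rest

/-- Unit `vorbis_decode_packet_rest.3b`: the inline DECODE_RAW of segment .3 (0x110f3b–0x110fbc + 0x110c6a–0x110c8d), from the join 0x110f3b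
(`At3Mid`) to the join 0x110fc2 with a DECODE_RAW result in r12d: the fast path through `fast_huffman` / `codeword_lengths` (K5, K3) with
the two stores `acc >>= n`, `valid_bits -= n` (V1), `valid_bits = 0, var = −1` when it went negative, or the call of
codebook_decode_scalar_raw. The walk is `decode_raw` of Lemmas.lean. -/
theorem Vorbis.Spec.Worked.vorbis_decode_packet_rest_3b_ok : Vorbis.Spec.vorbis_decode_packet_rest_3b.Statement := by
  intro Lay hLay μ hμ u₀ hcode h_raw hl1 hl8 hl4 hl2
  intro others frames len Ar stored room mode ysz u ret i j v hat g pc mb m hmb hmid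
  exact Vorbis.Spec.vorbis_decode_packet_rest_3b.decode_raw Lay hLay μ hμ u₀ hcode h_raw hl1 hl8 hl4 hl2 others frames len Ar stored room
    mode ysz u ret i j v hat g pc mb m hmb hmid
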